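-- pv_equiv track=rewrite | github.com/Voinarovsky/sweets | kontest/ex 5.py | sorted_people
-- ===== SOURCE A (Python) =====
-- def sorted_people(a):
--     prev_tree = -1
--     people = []
--     for i in range(len(a)):
--         if a[i] != -1:
--             people.append(a[i])
--     people.sort(reverse=True)
--     current_human = 0
--     for i in range(len(a)):
--         if a[i] != -1:
--             a[i] = people[current_human]
--             current_human += 1
--     return a
-- ===== SOURCE B (Python) =====
-- def sorted_people(a):
--     n = len(a)
--     for i in range(n):
--         if a[i] == -1:
--             continue
--         best = i
--         for j in range(i + 1, n):
--             if a[j] != -1 and a[j] > a[best]: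
--                 best = j
--         a[i], a[best] = a[best], a[i]
--     return a
-- ===== Notes on version B (the rewrite author's own statement) =====
-- stated objective: alternative
-- what changed: B replaces A's three-stage pipeline (collect the non-(-1) values, library-sort them descending, write them back with a running counter) by a single in-place selection sort: for each non-(-1) slot left to right it scans the remainder for the largest remaining non-(-1) value and swaps it in; no value list, no sort call, no write-back pass.
import Mathlib
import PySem

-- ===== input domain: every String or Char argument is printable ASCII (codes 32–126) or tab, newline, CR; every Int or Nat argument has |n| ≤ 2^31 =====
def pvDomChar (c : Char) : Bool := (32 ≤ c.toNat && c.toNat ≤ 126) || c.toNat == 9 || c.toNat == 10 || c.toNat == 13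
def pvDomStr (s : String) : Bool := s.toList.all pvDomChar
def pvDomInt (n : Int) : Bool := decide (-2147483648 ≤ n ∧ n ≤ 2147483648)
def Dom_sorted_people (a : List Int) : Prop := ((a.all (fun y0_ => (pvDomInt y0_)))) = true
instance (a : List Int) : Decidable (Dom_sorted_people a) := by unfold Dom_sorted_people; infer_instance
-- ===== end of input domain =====

set_option maxRecDepth 4000


-- B replaces A's collect / library-sort / write-back passes by a single in-place selection sort
-- over the non-(-1) slots (objective: alternative; B does more comparisons, not claimed faster).
-- Both Pythons mutate `a` in place; the equivalence proved here is about the RETURN value.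

-- ===== PORT A =====
-- people[current_human] is always in range in Python (one read per non-(-1) slot), so pyGetD's default is never hit.
def sorted_people (a : List Int) : List Int :=
  let people : List Int := (PySem.List.pyRange 0 (a.length : Int) 1).foldl
    (fun acc i => if PySem.List.pyGetD a i 0 != -1 then acc ++ [PySem.List.pyGetD a i 0] else acc) []
  let peopleS := PySem.List.sorted people (fun x => x) true
  let st := (PySem.List.pyRange 0 (a.length : Int) 1).foldl
    (fun (st : List Int × Int) i =>
      if PySem.List.pyGetD st.1 i 0 != -1 then
        (PySem.List.pySetD st.1 i (PySem.List.pyGetD peopleS st.2 0), st.2 + 1)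
      else st) (a, (0 : Int))
  st.1

-- ===== PORT B =====
-- selBody a l i is the body of B's outer `for i in range(n)` loop (n = len(a)); the swap reads
-- a[best], a[i] before writing, exactly as Python's tuple assignment does.
def selBody (a : List Int) (l : List Int) (i : Int) : List Int :=
  if PySem.List.pyGetD l i 0 = -1 then l
  else
    let best := (PySem.List.pyRange (i + 1) (a.length : Int) 1).foldl
      (fun best j =>
        if PySem.List.pyGetD l j 0 ≠ -1 ∧ PySem.List.pyGetD l j 0 > PySem.List.pyGetD l best 0
        then j else best) i
    PySem.List.pySetD (PySem.List.pySetD l i (PySem.List.pyGetD l best 0)) best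
      (PySem.List.pyGetD l i 0)

def sorted_people_alt (a : List Int) : List Int :=
  (PySem.List.pyRange 0 (a.length : Int) 1).foldl (selBody a) a

-- ===== PRECONDITION & SPEC =====
def Spec_sorted_people (a : List Int) (out : List Int) : Prop := out = sorted_people_alt a
instance (a : List Int) (out : List Int) : Decidable (Spec_sorted_people a out) := by unfold Spec_sorted_people; infer_instance

-- ===== CLAIM (what is proved, stated in full; the proofs are below) =====
def Claim_equal_sorted_people : Prop := ∀ (a : List Int), Dom_sorted_people a → Spec_sorted_people a (sorted_people a)

-- ===== LEMMAS AND PROOFS =====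

-- proof-layer model of the common result: replace each non-(-1) slot by the next value of vs
def pvFill : List Int → List Int → List Int
  | [], _ => []
  | x :: xs, vs => if x != -1 then vs.headD 0 :: pvFill xs vs.tail else x :: pvFill xs vs

-- the sorted descending value list both programs realise
def sDesc (a : List Int) : List Int := PySem.List.sorted (a.filter (· != -1)) (fun x => x) true

theorem pvFill_length (l vs : List Int) : (pvFill l vs).length = l.length := by
  induction l generalizing vs with
  | nil => rfl
  | cons x xs ih => simp only [pvFill]; split <;> simp [ih]

theorem pvFill_append (l₁ l₂ vs : List Int) :
    pvFill (l₁ ++ l₂) vs = pvFill l₁ vs ++ pvFill l₂ (vs.drop (l₁.countP (· != -1))) := by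
  induction l₁ generalizing vs with
  | nil => simp [pvFill]
  | cons x xs ih =>
    simp only [List.cons_append, pvFill, List.countP_cons]
    by_cases h : x != -1
    · simp [h, ih, Nat.add_comm]
    · simp at h
      simp [h]
      exact ih _

theorem getD_eq_headD_drop (vs : List Int) (n : Nat) : vs.getD n 0 = (vs.drop n).headD 0 := by
  induction vs generalizing n with
  | nil => simp
  | cons v vt _ =>
    cases n with
    | zero => simp
    | succ n => simp

-- A's writeback loop over indices [0,k) produces pvFill on the prefix
theorem loopA_invariant (a vs : List Int) (k : Nat) (hk : k ≤ a.length) :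
    (PySem.List.pyRange 0 (k : Int) 1).foldl
      (fun (st : List Int × Int) i =>
        if PySem.List.pyGetD st.1 i 0 != -1 then
          (PySem.List.pySetD st.1 i (PySem.List.pyGetD vs st.2 0), st.2 + 1)
        else st) (a, (0 : Int))
    = (pvFill (a.take k) vs ++ a.drop k, ((a.take k).countP (· != -1) : Int)) := by
  induction k with
  | zero => simp [PySem.List.pyRange_one_eq_nil, pvFill]
  | succ k ih =>
    have hk' : k ≤ a.length := Nat.le_of_succ_le hk
    have hklt : k < a.length := hk
    have hsplit : PySem.List.pyRange 0 ((k + 1 : Nat) : Int) 1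
        = PySem.List.pyRange 0 (k : Int) 1 ++ [(k : Int)] := by
      push_cast
      exact PySem.List.pyRange_one_succ_right (by positivity)
    rw [hsplit, List.foldl_append, ih hk']
    have hlen : (pvFill (a.take k) vs).length = k := by
      rw [pvFill_length, List.length_take]; omega
    have hdrop : a.drop k = a[k] :: a.drop (k + 1) := List.drop_eq_getElem_cons hklt
    have hget : PySem.List.pyGetD (pvFill (a.take k) vs ++ a.drop k) (k : Int) 0 = a[k] := by
      rw [PySem.List.pyGetD_natCast, List.getD_eq_getElem?_getD,
          List.getElem?_append_right (by omega), hlen, Nat.sub_self, hdrop]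
      rfl
    have htake : a.take (k + 1) = a.take k ++ [a[k]] := by
      rw [List.take_add_one, List.getElem?_eq_getElem hklt]
      rfl
    simp only [List.foldl_cons, List.foldl_nil, hget]
    by_cases hx : a[k] != -1
    · simp only [hx, if_true]
      rw [PySem.List.pySetD_natCast]
      simp only [Prod.mk.injEq]
      refine ⟨?_, ?_⟩
      · -- list component
        rw [htake, pvFill_append]
        have : (pvFill (a.take k) vs ++ a.drop k).set k (PySem.List.pyGetD vs ((a.take k).countP (· != -1) : Int) 0)
            = pvFill (a.take k) vs ++ [(vs.drop ((a.take k).countP (· != -1))).headD 0] ++ a.drop (k+1) := by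
          rw [List.set_append_right _ _ (by omega), hlen, Nat.sub_self, hdrop,
              List.set_cons_zero, PySem.List.pyGetD_natCast, getD_eq_headD_drop]
          simp
        rw [this]
        simp [pvFill, hx]
      · -- counter component
        have h1 : List.countP (fun x => x != -1) [a[k]] = 1 := by simp [hx]
        rw [htake, List.countP_append, h1]
        push_cast; ring
    · rw [if_neg hx]
      simp only [bne_iff_ne, ne_eq, not_not] at hx
      rw [htake, pvFill_append]
      simp only [Prod.mk.injEq]
      refine ⟨?_, ?_⟩
      · simp [pvFill, hx, hdrop]
      · have h1 : List.countP (fun x => x != -1) [a[k]] = 0 := by simp [hx]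
        rw [List.countP_append, h1]
        simp

-- A's first loop collects exactly the non-(-1) elements in order
theorem peopleA_eq (a : List Int) :
    (PySem.List.pyRange 0 (a.length : Int) 1).foldl
      (fun acc i => if PySem.List.pyGetD a i 0 != -1 then acc ++ [PySem.List.pyGetD a i 0] else acc) []
    = a.filter (· != -1) := by
  rw [PySem.List.foldl_append_if (p := fun i => PySem.List.pyGetD a i 0 != -1)
        (f := fun i => PySem.List.pyGetD a i 0), List.nil_append]
  rw [show (fun i => PySem.List.pyGetD a i 0 != -1)
        = ((fun x => x != -1) ∘ (fun i => PySem.List.pyGetD a i 0)) from rfl]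
  rw [← List.filter_map, PySem.List.map_pyGetD_pyRange_zero']

theorem sorted_people_eq_fill (a : List Int) :
    sorted_people a = pvFill a (sDesc a) := by
  show ((PySem.List.pyRange 0 (a.length : Int) 1).foldl
    (fun (st : List Int × Int) i =>
      if PySem.List.pyGetD st.1 i 0 != -1 then
        (PySem.List.pySetD st.1 i (PySem.List.pyGetD
          (PySem.List.sorted ((PySem.List.pyRange 0 (a.length : Int) 1).foldl
            (fun acc i => if PySem.List.pyGetD a i 0 != -1 then acc ++ [PySem.List.pyGetD a i 0] else acc) [])
            (fun x => x) true) st.2 0), st.2 + 1)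
      else st) (a, (0 : Int))).1 = _
  rw [peopleA_eq, loopA_invariant _ _ a.length le_rfl]
  simp [sDesc]

-- ----- B side: the selection-sort loop realises pvFill -----

-- invariant after k outer iterations: prefix finalised to pvFill, -1 pattern of the suffix
-- untouched, suffix values a permutation of the still-unplaced sorted values
def SelInv (a : List Int) (k : Nat) (l : List Int) : Prop :=
  l.length = a.length ∧
  l.take k = (pvFill a (sDesc a)).take k ∧
  (∀ p : Nat, k ≤ p → p < a.length → (l.getD p 0 = -1 ↔ a.getD p 0 = -1)) ∧
  ((l.drop k).filter (· != -1)).Perm ((sDesc a).drop ((a.take k).countP (· != -1)))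

theorem pvFill_take (l vs : List Int) (k : Nat) : (pvFill l vs).take k = pvFill (l.take k) vs := by
  induction l generalizing vs k with
  | nil => simp [pvFill]
  | cons x xs ih =>
    cases k with
    | zero => simp [pvFill]
    | succ k =>
      simp only [pvFill, List.take_succ_cons]
      split <;> simp [List.take_succ_cons, *]

theorem sel_swap_perm (t : List Int) (p : Nat) (hp : p < t.length) :
    ((t.set 0 (t.getD p 0)).set p (t.getD 0 0)).Perm t := by
  cases t with
  | nil => simp at hp
  | cons x r =>
    cases p with
    | zero => simp
    | succ q =>
      have hq : q < r.length := by simpa using hp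
      have hget : (x :: r).getD (q+1) 0 = r[q] := by
        simp [List.getD_eq_getElem?_getD, List.getElem?_eq_getElem hq]
      rw [hget]
      simp only [List.getD_cons_zero, List.set_cons_zero, List.set_cons_succ]
      rw [List.set_eq_take_cons_drop x hq]
      have hr : r = r.take q ++ r[q] :: r.drop (q + 1) := by
        conv_lhs => rw [← List.take_append_drop q r, List.drop_eq_getElem_cons hq]
      have p1 : (r[q] :: (r.take q ++ x :: r.drop (q + 1))).Perm
          (x :: (r.take q ++ r[q] :: r.drop (q + 1))) := by
        have s1 : (r.take q ++ x :: r.drop (q + 1)).Perm (x :: (r.take q ++ r.drop (q + 1))) :=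
          List.perm_middle
        have s2 : (r.take q ++ r[q] :: r.drop (q + 1)).Perm (r[q] :: (r.take q ++ r.drop (q + 1))) :=
          List.perm_middle
        exact ((s1.cons r[q]).trans (List.Perm.swap x r[q] _)).trans (s2.cons x).symm
      rw [← hr] at p1
      exact p1

theorem sel_swap_drop_perm (l : List Int) (k b : Nat) (hk : k < l.length) (hb : b < l.length)
    (hkb : k ≤ b) :
    (((l.set k (l.getD b 0)).set b (l.getD k 0)).drop k).Perm (l.drop k) := by
  have e1 : (l.drop k).getD (b - k) 0 = l.getD b 0 := by
    simp [List.getD_eq_getElem?_getD, List.getElem?_drop, Nat.add_sub_cancel' hkb]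
  have e2 : (l.drop k).getD 0 0 = l.getD k 0 := by
    simp [List.getD_eq_getElem?_getD, List.getElem?_drop]
  have h1 : ((l.set k (l.getD b 0)).set b (l.getD k 0)).drop k
      = ((l.drop k).set 0 (l.getD b 0)).set (b - k) (l.getD k 0) := by
    rw [List.drop_set, List.drop_set, if_neg (by omega), if_neg (by omega), Nat.sub_self]
  rw [h1, ← e1, ← e2]
  exact sel_swap_perm (l.drop k) (b - k) (by simp [List.length_drop]; omega)

theorem sel_swap_getD (l : List Int) (k b p : Nat) (hk : k < l.length) (hb : b < l.length)
    (_hp : p < l.length) :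
    ((l.set k (l.getD b 0)).set b (l.getD k 0)).getD p 0
    = if p = b then l.getD k 0 else if p = k then l.getD b 0 else l.getD p 0 := by
  by_cases h1 : p = b
  · subst h1
    simp [List.getD_eq_getElem?_getD, hb, List.length_set]
  · rw [List.getD_eq_getElem?_getD, List.getElem?_set_ne (Ne.symm h1), if_neg h1]
    by_cases h2 : p = k
    · subst h2
      simp [hk, List.getD_eq_getElem?_getD]
    · rw [List.getElem?_set_ne (Ne.symm h2), if_neg h2, List.getD_eq_getElem?_getD]

theorem sel_swap_take (l : List Int) (k b : Nat) (hkb : k ≤ b) :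
    ((l.set k (l.getD b 0)).set b (l.getD k 0)).take k = l.take k := by
  apply List.ext_getElem (by simp)
  intro i h1 h2
  have hik : i < k := by simp at h1; omega
  simp only [List.getElem_take, List.getElem_set]
  rw [if_neg (by omega), if_neg (by omega)]

theorem argmax_spec (l : List Int) (k : Nat) (hk : k < l.length)
    (hlk : l.getD k 0 ≠ -1) :
    ∀ m : Nat, k < m → m ≤ l.length →
    ∃ b : Nat, (PySem.List.pyRange ((k : Int) + 1) (m : Int) 1).foldl
        (fun best j =>
          if PySem.List.pyGetD l j 0 ≠ -1 ∧ PySem.List.pyGetD l j 0 > PySem.List.pyGetD l best 0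
          then j else best) (k : Int)
      = (b : Int) ∧ k ≤ b ∧ b < m ∧ l.getD b 0 ≠ -1 ∧
      ∀ j : Nat, k ≤ j → j < m → l.getD j 0 ≠ -1 → l.getD j 0 ≤ l.getD b 0 := by
  intro m hkm
  induction m, hkm using Nat.le_induction with
  | base =>
    intro _
    refine ⟨k, ?_, le_rfl, Nat.lt_succ_self k, hlk, ?_⟩
    · rw [show ((k + 1 : Nat) : Int) = (k : Int) + 1 by push_cast; ring,
        PySem.List.pyRange_one_eq_nil le_rfl]
      rfl
    · intro j h1 h2 _
      have : j = k := by omega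
      subst this; exact le_rfl
  | succ m hm ih =>
    intro hmlen
    obtain ⟨b, hfold, hkb, hbm, hbne, hmax⟩ := ih (by omega)
    have hsplit : PySem.List.pyRange ((k : Int) + 1) ((m + 1 : Nat) : Int) 1
        = PySem.List.pyRange ((k : Int) + 1) (m : Int) 1 ++ [(m : Int)] := by
      push_cast
      exact PySem.List.pyRange_one_succ_right (by exact_mod_cast hm)
    rw [hsplit, List.foldl_append, hfold]
    simp only [List.foldl_cons, List.foldl_nil, PySem.List.pyGetD_natCast]
    by_cases hc : l.getD m 0 ≠ -1 ∧ l.getD m 0 > l.getD b 0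
    · rw [if_pos hc]
      refine ⟨m, rfl, by omega, by omega, hc.1, ?_⟩
      intro j h1 h2 hj
      rcases Nat.lt_or_ge j m with h | h
      · exact le_of_lt (lt_of_le_of_lt (hmax j h1 h hj) hc.2)
      · have : j = m := by omega
        subst this; exact le_rfl
    · rw [if_neg hc]
      refine ⟨b, rfl, hkb, by omega, hbne, ?_⟩
      intro j h1 h2 hj
      rcases Nat.lt_or_ge j m with h | h
      · exact hmax j h1 h hj
      · have : j = m := by omega
        subst this
        rcases not_and_or.mp hc with h' | h'
        · exact absurd hj h'
        · omega

theorem sel_step (a l : List Int) (k : Nat) (hk : k < a.length) (hInv : SelInv a k l) :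
    SelInv a (k + 1) (selBody a l (k : Int)) := by
  obtain ⟨hlen, htake, hiff, hperm⟩ := hInv
  have hkl : k < l.length := by omega
  have hgetk : a.getD k 0 = a[k] := List.getD_eq_getElem a 0 hk
  have htka : a.take (k + 1) = a.take k ++ [a[k]] := List.take_succ_eq_append_getElem hk
  have hfillk : (pvFill a (sDesc a)).take k = pvFill (a.take k) (sDesc a) := pvFill_take a _ k
  have hfillk1 : (pvFill a (sDesc a)).take (k + 1) = pvFill (a.take k) (sDesc a) ++
      pvFill [a[k]] ((sDesc a).drop ((a.take k).countP (· != -1))) := by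
    rw [pvFill_take, htka, pvFill_append]
  unfold selBody
  rw [PySem.List.pyGetD_natCast]
  by_cases hg : l.getD k 0 = -1
  · rw [if_pos hg]
    have hak : a.getD k 0 = -1 := (hiff k le_rfl hk).mp hg
    have hakE : a[k] = -1 := by rw [← hgetk]; exact hak
    have hcnt : (a.take (k + 1)).countP (· != -1) = (a.take k).countP (· != -1) := by
      rw [htka, List.countP_append]
      simp [hakE]
    refine ⟨hlen, ?_, fun p hp1 hp2 => hiff p (by omega) hp2, ?_⟩
    · rw [List.take_succ_eq_append_getElem hkl, hfillk1, ← hfillk, ← htake]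
      congr 1
      have : l[k] = -1 := by rw [← List.getD_eq_getElem l 0 hkl]; exact hg
      simp [pvFill, hakE, this]
    · rw [hcnt]
      have hdl : l.drop k = l[k] :: l.drop (k + 1) := List.drop_eq_getElem_cons hkl
      have hlkE : l[k] = -1 := by rw [← List.getD_eq_getElem l 0 hkl]; exact hg
      rw [hdl] at hperm
      simpa [List.filter_cons, hlkE] using hperm
  · rw [if_neg hg]
    obtain ⟨b, hfold, hkb, hbm, hbne, hmax⟩ :=
      argmax_spec l k hkl hg a.length (by omega) (by omega)
    simp only [hfold, PySem.List.pySetD_natCast, PySem.List.pyGetD_natCast]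
    have hbl : b < l.length := by omega
    have hakne : a.getD k 0 ≠ -1 := fun h => hg ((hiff k le_rfl hk).mpr h)
    have hakEne : a[k] ≠ -1 := by rw [← hgetk]; exact hakne
    set s := sDesc a with hs
    set c := (a.take k).countP (· != -1) with hc
    -- the head of the remaining sorted values
    have hdl : l.drop k = l.getD k 0 :: l.drop (k + 1) := by
      rw [List.drop_eq_getElem_cons hkl, List.getD_eq_getElem l 0 hkl]
    have hmemk : l.getD k 0 ∈ (l.drop k).filter (· != -1) := by
      rw [hdl, List.filter_cons, if_pos (by simpa using hg)]
      exact List.mem_cons_self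
    have hne : s.drop c ≠ [] := by
      intro h
      rw [h] at hperm
      have hfe : (l.drop k).filter (· != -1) = [] := hperm.symm.nil_eq.symm
      rw [hfe] at hmemk
      simp at hmemk
    have hcs : c < s.length := by
      by_contra h
      exact hne (List.drop_eq_nil_of_le (by omega))
    have hdropc : s.drop c = s[c] :: s.drop (c + 1) := List.drop_eq_getElem_cons hcs
    have hpair : s.Pairwise (fun x y => y ≤ x) := by
      rw [hs]
      exact PySem.List.sorted_pairwise_rev (a.filter (· != -1)) (fun x => x)
    have hmemb : l.getD b 0 ∈ (l.drop k).filter (· != -1) := by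
      have h1 : l.getD b 0 = (l.drop k)[b - k]'(by simp [List.length_drop]; omega) := by
        rw [List.getElem_drop, List.getD_eq_getElem l 0 hbl]
        congr 1
        omega
      rw [List.mem_filter]
      refine ⟨?_, by simpa using hbne⟩
      rw [h1]
      exact List.getElem_mem _
    have hble : l.getD b 0 ≤ s[c] := by
      have h2 := hperm.mem_iff.mp hmemb
      rw [hdropc] at h2
      rcases List.mem_cons.mp h2 with h3 | h3
      · exact le_of_eq h3
      · have hpd : (s.drop c).Pairwise (fun x y => y ≤ x) := hpair.drop
        rw [hdropc] at hpd
        exact (List.pairwise_cons.mp hpd).1 _ h3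
    have hgeb : s[c] ≤ l.getD b 0 := by
      have h2 : s[c] ∈ (l.drop k).filter (· != -1) := by
        apply hperm.symm.mem_iff.mp
        rw [hdropc]
        exact List.mem_cons_self
      obtain ⟨hmem, hne2⟩ := List.mem_filter.mp h2
      obtain ⟨j, hj, hje⟩ := List.getElem_of_mem hmem
      have hjl : k + j < l.length := by simp [List.length_drop] at hj; omega
      have h3 : l.getD (k + j) 0 = s[c] := by
        rw [List.getD_eq_getElem l 0 hjl, ← hje, List.getElem_drop]
      rw [← h3]
      exact hmax (k + j) (by omega) (by omega) (by rw [h3]; simpa using hne2)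
    have hbcs : l.getD b 0 = s[c] := le_antisymm hble hgeb
    -- the swapped list
    have hswtake : ((l.set k (l.getD b 0)).set b (l.getD k 0)).take k = l.take k :=
      sel_swap_take l k b hkb
    have hswlen : ((l.set k (l.getD b 0)).set b (l.getD k 0)).length = l.length := by simp
    have hswk : ((l.set k (l.getD b 0)).set b (l.getD k 0)).getD k 0 = s[c] := by
      rw [sel_swap_getD l k b k hkl hbl hkl]
      by_cases h : k = b
      · rw [if_pos h, ← hbcs, h]
      · rw [if_neg h, if_pos rfl, hbcs]
    have hcnt1 : (a.take (k + 1)).countP (· != -1) = c + 1 := by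
      rw [htka, List.countP_append, ← hc]
      simp [hakEne]
    refine ⟨by rw [hswlen, hlen], ?_, ?_, ?_⟩
    · -- prefix
      rw [List.take_succ_eq_append_getElem (by omega), hfillk1, ← hfillk, ← htake, hswtake]
      congr 1
      · have : ((l.set k (l.getD b 0)).set b (l.getD k 0))[k]'(by omega) = s[c] := by
          rw [← List.getD_eq_getElem _ 0 (by omega : k < ((l.set k (l.getD b 0)).set b (l.getD k 0)).length)]
          exact hswk
        rw [this, hdropc]
        simp [pvFill, hakEne, List.getElem?_eq_getElem hcs]
    · -- -1 pattern
      intro p hp1 hp2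
      have hpl : p < l.length := by omega
      rw [sel_swap_getD l k b p hkl hbl hpl]
      by_cases h1 : p = b
      · subst h1
        rw [if_pos rfl]
        constructor
        · intro h; exact absurd h hg
        · intro h; exact absurd h (fun hh => ((hiff p hkb hp2).mpr hh ▸ hbne) rfl)
      · rw [if_neg h1, if_neg (by omega)]
        exact hiff p (by omega) hp2
    · -- permutation
      rw [hcnt1]
      have hdp : (((l.set k (l.getD b 0)).set b (l.getD k 0)).drop k).Perm (l.drop k) :=
        sel_swap_drop_perm l k b hkl hbl hkb
      have hfp := hdp.filter (· != -1)
      have hchain := hfp.trans hperm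
      have hsw_dl : ((l.set k (l.getD b 0)).set b (l.getD k 0)).drop k
          = s[c] :: ((l.set k (l.getD b 0)).set b (l.getD k 0)).drop (k + 1) := by
        rw [List.drop_eq_getElem_cons (by omega : k < ((l.set k (l.getD b 0)).set b (l.getD k 0)).length)]
        congr 1
        rw [← List.getD_eq_getElem _ 0 (by omega : k < ((l.set k (l.getD b 0)).set b (l.getD k 0)).length)]
        exact hswk
      rw [hsw_dl, List.filter_cons] at hchain
      have hscne : (s[c] != -1) = true := by
        have : s[c] ∈ (l.drop k).filter (· != -1) := by
          apply hperm.symm.mem_iff.mp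
          rw [hdropc]
          exact List.mem_cons_self
        exact (List.mem_filter.mp this).2
      rw [if_pos hscne, hdropc] at hchain
      exact hchain.cons_inv

theorem selB_loop (a : List Int) (k : Nat) (hk : k ≤ a.length) :
    SelInv a k ((PySem.List.pyRange 0 (k : Int) 1).foldl (selBody a) a) := by
  induction k with
  | zero =>
    refine ⟨rfl, by simp, fun p _ _ => Iff.rfl, ?_⟩
    simpa [sDesc] using (PySem.List.sorted_perm (a.filter (· != -1)) (fun x => x) true).symm
  | succ k ih =>
    have hsplit : PySem.List.pyRange 0 ((k + 1 : Nat) : Int) 1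
        = PySem.List.pyRange 0 (k : Int) 1 ++ [(k : Int)] := by
      push_cast
      exact PySem.List.pyRange_one_succ_right (by positivity)
    rw [hsplit, List.foldl_append]
    exact sel_step a _ k hk (ih (Nat.le_of_succ_le hk))

theorem sorted_people_alt_eq_fill (a : List Int) :
    sorted_people_alt a = pvFill a (sDesc a) := by
  obtain ⟨hlen, htake, -, -⟩ := selB_loop a a.length le_rfl
  have h1 : ((PySem.List.pyRange 0 (a.length : Int) 1).foldl (selBody a) a).take a.length
      = (PySem.List.pyRange 0 (a.length : Int) 1).foldl (selBody a) a :=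
    List.take_of_length_le (le_of_eq hlen)
  have h2 : (pvFill a (sDesc a)).take a.length = pvFill a (sDesc a) :=
    List.take_of_length_le (le_of_eq (pvFill_length a (sDesc a)))
  rw [sorted_people_alt, ← h1, htake, h2]

-- ===== VERDICT (by name: the statement is the Claim_ definition above) =====
theorem sorted_people_spec : Claim_equal_sorted_people := by
  intro a _
  unfold Spec_sorted_people
  rw [sorted_people_eq_fill, sorted_people_alt_eq_fill]
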